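-- pv_equiv track=rewrite | github.com/estebans0/TP1TallerProgramacion | TP1Funciones.py | cifBinario
-- ===== SOURCE A (Python) =====
-- def cifBinario(pfrase):
--     """
--     Funcionalidad: Crea un cifrado al convertir la frase ingresada a valores binarios.
--     Entradas:
--     -pfrase(str): El mensaje a ser cifrado.
--     Salidas:
--     -cifrado(str): El mensaje convertido a binario.
--     """
--     pfrase = pfrase.lower()
--     cifrado = ""
--     for i in pfrase:
--         for j in i:
--             if j == " ":
--                 cifrado += "* "
--             elif j == "a":
--                 cifrado += "00000 "
--             elif j == "b":
--                 cifrado += "00001 "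
--             elif j == "c":
--                 cifrado += "00010 "
--             elif j == "d":
--                 cifrado += "00011 "
--             elif j == "e":
--                 cifrado += "00100 "
--             elif j == "f":
--                 cifrado += "00101 "
--             elif j == "g":
--                 cifrado += "00110 "
--             elif j == "h":
--                 cifrado += "00111 "
--             elif j == "i":
--                 cifrado += "01000 "
--             elif j == "j":
--                 cifrado += "01001 "
--             elif j == "k":
--                 cifrado += "01010 "
--             elif j == "l":
--                 cifrado += "01011 "
--             elif j == "m":
--                 cifrado += "01100 "
--             elif j == "n":
--                 cifrado += "01101 "
--             elif j == "o":
--                 cifrado += "01110 "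
--             elif j == "p":
--                 cifrado += "01111 "
--             elif j == "q":
--                 cifrado += "10000 "
--             elif j == "r":
--                 cifrado += "10001 "
--             elif j == "s":
--                 cifrado += "10010 "
--             elif j == "t":
--                 cifrado += "10011 "
--             elif j == "u":
--                 cifrado += "10100 "
--             elif j == "v":
--                 cifrado += "10101 "
--             elif j == "w":
--                 cifrado += "10110 "
--             elif j == "x":
--                 cifrado += "10111 "
--             elif j == "y":
--                 cifrado += "11000 "
--             elif j == "z":
--                 cifrado += "11001 "
--     return cifrado
-- ===== SOURCE B (Python) =====
-- def cifBinario(pfrase):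
--     partes = []
--     for c in pfrase.lower():
--         if c == ' ':
--             partes.append('* ')
--         elif 'a' <= c <= 'z':
--             partes.append(format(ord(c) - ord('a'), '05b') + ' ')
--     return ''.join(partes)
-- ===== Notes on version B (the rewrite author's own statement) =====
-- stated objective: simpler
-- what changed: B derives each 5-bit code arithmetically from the letter's alphabet index (zero-padded binary of ord(c) minus ord of the first letter) with a single range test, instead of a 27-branch elif chain over a hard-coded table, and joins a list of pieces instead of repeated string concatenation.
import Mathlib
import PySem

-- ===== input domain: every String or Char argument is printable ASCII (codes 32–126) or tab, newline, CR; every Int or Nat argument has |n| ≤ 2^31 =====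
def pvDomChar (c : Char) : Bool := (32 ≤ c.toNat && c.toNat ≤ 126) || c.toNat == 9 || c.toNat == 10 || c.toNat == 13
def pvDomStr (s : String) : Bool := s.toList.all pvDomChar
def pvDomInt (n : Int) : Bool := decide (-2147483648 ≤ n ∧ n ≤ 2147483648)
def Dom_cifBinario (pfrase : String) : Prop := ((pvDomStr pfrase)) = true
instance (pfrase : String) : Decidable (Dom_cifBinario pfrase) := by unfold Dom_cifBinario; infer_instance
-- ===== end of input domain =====

-- B replaces A's 27-branch elif table by an arithmetic derivation of each 5-bit code
-- from the letter's alphabet index, collecting pieces in a list joined once (objective: simpler).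

-- ===== PORT A =====
-- literal transliteration of A's elif chain; strings handled as List Char (PySem convention)
def cifBinario (pfrase : String) : String :=
  String.mk ((PySem.Chars.lower pfrase.toList).foldl (fun cifrado i =>
    [i].foldl (fun cifrado j =>
      if j = ' ' then cifrado ++ "* ".toList
      else if j = 'a' then cifrado ++ "00000 ".toList
      else if j = 'b' then cifrado ++ "00001 ".toList
      else if j = 'c' then cifrado ++ "00010 ".toList
      else if j = 'd' then cifrado ++ "00011 ".toList
      else if j = 'e' then cifrado ++ "00100 ".toList
      else if j = 'f' then cifrado ++ "00101 ".toList
      else if j = 'g' then cifrado ++ "00110 ".toList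
      else if j = 'h' then cifrado ++ "00111 ".toList
      else if j = 'i' then cifrado ++ "01000 ".toList
      else if j = 'j' then cifrado ++ "01001 ".toList
      else if j = 'k' then cifrado ++ "01010 ".toList
      else if j = 'l' then cifrado ++ "01011 ".toList
      else if j = 'm' then cifrado ++ "01100 ".toList
      else if j = 'n' then cifrado ++ "01101 ".toList
      else if j = 'o' then cifrado ++ "01110 ".toList
      else if j = 'p' then cifrado ++ "01111 ".toList
      else if j = 'q' then cifrado ++ "10000 ".toList
      else if j = 'r' then cifrado ++ "10001 ".toList
      else if j = 's' then cifrado ++ "10010 ".toList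
      else if j = 't' then cifrado ++ "10011 ".toList
      else if j = 'u' then cifrado ++ "10100 ".toList
      else if j = 'v' then cifrado ++ "10101 ".toList
      else if j = 'w' then cifrado ++ "10110 ".toList
      else if j = 'x' then cifrado ++ "10111 ".toList
      else if j = 'y' then cifrado ++ "11000 ".toList
      else if j = 'z' then cifrado ++ "11001 ".toList
      else cifrado) cifrado) "".toList)

-- ===== PORT B =====
-- literal transliteration of Source B; ord(c) is c.toNat (exact on ASCII), format(n,'05b') is zfill(toBin n, 5)
def cifBinario_alt (pfrase : String) : String :=
  String.mk (PySem.Chars.join [] ((PySem.Chars.lower pfrase.toList).foldl (fun partes c =>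
    if c = ' ' then partes ++ ["* ".toList]
    else if 'a' ≤ c ∧ c ≤ 'z' then
      partes ++ [PySem.Chars.zfill (PySem.Int.toBinChars ((c.toNat : Int) - (('a'.toNat : Int)))) 5 ++ " ".toList]
    else partes) []))

-- ===== PRECONDITION & SPEC =====
def Spec_cifBinario (pfrase : String) (out : String) : Prop := out = cifBinario_alt pfrase
instance (pfrase : String) (out : String) : Decidable (Spec_cifBinario pfrase out) := by unfold Spec_cifBinario; infer_instance

-- ===== CLAIM (what is proved, stated in full; the proofs are below) =====
def Claim_equal_cifBinario : Prop := ∀ (pfrase : String), Dom_cifBinario pfrase → Spec_cifBinario pfrase (cifBinario pfrase)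

-- ===== LEMMAS AND PROOFS =====

-- A's per-character contribution
def pieceA (j : Char) : List Char :=
  if j = ' ' then "* ".toList
  else if j = 'a' then "00000 ".toList
  else if j = 'b' then "00001 ".toList
  else if j = 'c' then "00010 ".toList
  else if j = 'd' then "00011 ".toList
  else if j = 'e' then "00100 ".toList
  else if j = 'f' then "00101 ".toList
  else if j = 'g' then "00110 ".toList
  else if j = 'h' then "00111 ".toList
  else if j = 'i' then "01000 ".toList
  else if j = 'j' then "01001 ".toList
  else if j = 'k' then "01010 ".toList
  else if j = 'l' then "01011 ".toList
  else if j = 'm' then "01100 ".toList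
  else if j = 'n' then "01101 ".toList
  else if j = 'o' then "01110 ".toList
  else if j = 'p' then "01111 ".toList
  else if j = 'q' then "10000 ".toList
  else if j = 'r' then "10001 ".toList
  else if j = 's' then "10010 ".toList
  else if j = 't' then "10011 ".toList
  else if j = 'u' then "10100 ".toList
  else if j = 'v' then "10101 ".toList
  else if j = 'w' then "10110 ".toList
  else if j = 'x' then "10111 ".toList
  else if j = 'y' then "11000 ".toList
  else if j = 'z' then "11001 ".toList
  else []

-- B's per-character contribution (a list of 0 or 1 pieces)
def pieceB (c : Char) : List (List Char) :=
  if c = ' ' then ["* ".toList]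
  else if 'a' ≤ c ∧ c ≤ 'z' then
    [PySem.Chars.zfill (PySem.Int.toBinChars ((c.toNat : Int) - (('a'.toNat : Int)))) 5 ++ " ".toList]
  else []

theorem toNat_le_of_le {c d : Char} (h : c ≤ d) : c.toNat ≤ d.toNat :=
  UInt32.le_iff_toNat_le.mp (Char.le_def.mp h)

theorem piece_eq (c : Char) : pieceA c = (pieceB c).flatten := by
  by_cases hs : c = ' '
  · subst hs; decide
  by_cases hr : 'a' ≤ c ∧ c ≤ 'z'
  · obtain ⟨h1, h2⟩ := hr
    have h1' : 97 ≤ c.toNat := Nat.le_trans (by decide) (toNat_le_of_le h1)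
    have h2' : c.toNat ≤ 122 := Nat.le_trans (toNat_le_of_le h2) (by decide)
    have hc : c = Char.ofNat c.toNat := (Char.ofNat_toNat c).symm
    set n := c.toNat with hn
    interval_cases n <;> (rw [hc]; decide)
  · have ne : ∀ d : Char, 'a' ≤ d → d ≤ 'z' → c ≠ d :=
      fun d hl hu he => hr (by subst he; exact ⟨hl, hu⟩)
    simp only [pieceA, pieceB, hs, hr, if_false,
      ne 'a' (by decide) (by decide), ne 'b' (by decide) (by decide),
      ne 'c' (by decide) (by decide), ne 'd' (by decide) (by decide),
      ne 'e' (by decide) (by decide), ne 'f' (by decide) (by decide),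
      ne 'g' (by decide) (by decide), ne 'h' (by decide) (by decide),
      ne 'i' (by decide) (by decide), ne 'j' (by decide) (by decide),
      ne 'k' (by decide) (by decide), ne 'l' (by decide) (by decide),
      ne 'm' (by decide) (by decide), ne 'n' (by decide) (by decide),
      ne 'o' (by decide) (by decide), ne 'p' (by decide) (by decide),
      ne 'q' (by decide) (by decide), ne 'r' (by decide) (by decide),
      ne 's' (by decide) (by decide), ne 't' (by decide) (by decide),
      ne 'u' (by decide) (by decide), ne 'v' (by decide) (by decide),
      ne 'w' (by decide) (by decide), ne 'x' (by decide) (by decide),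
      ne 'y' (by decide) (by decide), ne 'z' (by decide) (by decide)]
    simp

theorem foldA_eq (l : List Char) (acc : List Char) :
    (l.foldl (fun cifrado i => [i].foldl (fun s j => s ++ pieceA j) cifrado) acc)
      = acc ++ (l.map pieceA).flatten := by
  induction l generalizing acc with
  | nil => simp
  | cons c l ih => simp [List.foldl]

theorem foldB_eq (l : List Char) (acc : List (List Char)) :
    (l.foldl (fun partes c => partes ++ pieceB c) acc) = acc ++ l.flatMap pieceB := by
  induction l generalizing acc with
  | nil => simp
  | cons c l ih => simp [List.foldl, ih]

theorem join_nil_eq_flatten (ps : List (List Char)) :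
    PySem.Chars.join ([] : List Char) ps = ps.flatten := by
  induction ps with
  | nil => simp [PySem.Chars.join_nil]
  | cons a ps ih =>
    cases ps with
    | nil => simp [PySem.Chars.join_singleton]
    | cons b rest => simp [PySem.Chars.join_cons_cons, ih]

theorem foldl_fun_congr {a b : Type} (l : List b) (f g : a → b → a) (init : a)
    (h : ∀ acc x, f acc x = g acc x) : l.foldl f init = l.foldl g init := by
  induction l generalizing init with
  | nil => rfl
  | cons c l ih => simp only [List.foldl, h]; exact ih _

theorem flatten_eq (l : List Char) : (l.map pieceA).flatten = (l.flatMap pieceB).flatten := by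
  induction l with
  | nil => rfl
  | cons c l ih => simp [piece_eq c, ih]

theorem stepA_eq : ∀ (s : List Char) (i : Char),
    (fun (cifrado : List Char) (i : Char) =>
        [i].foldl (fun cifrado j =>
          if j = ' ' then cifrado ++ "* ".toList
          else if j = 'a' then cifrado ++ "00000 ".toList
          else if j = 'b' then cifrado ++ "00001 ".toList
          else if j = 'c' then cifrado ++ "00010 ".toList
          else if j = 'd' then cifrado ++ "00011 ".toList
          else if j = 'e' then cifrado ++ "00100 ".toList
          else if j = 'f' then cifrado ++ "00101 ".toList
          else if j = 'g' then cifrado ++ "00110 ".toList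
          else if j = 'h' then cifrado ++ "00111 ".toList
          else if j = 'i' then cifrado ++ "01000 ".toList
          else if j = 'j' then cifrado ++ "01001 ".toList
          else if j = 'k' then cifrado ++ "01010 ".toList
          else if j = 'l' then cifrado ++ "01011 ".toList
          else if j = 'm' then cifrado ++ "01100 ".toList
          else if j = 'n' then cifrado ++ "01101 ".toList
          else if j = 'o' then cifrado ++ "01110 ".toList
          else if j = 'p' then cifrado ++ "01111 ".toList
          else if j = 'q' then cifrado ++ "10000 ".toList
          else if j = 'r' then cifrado ++ "10001 ".toList
          else if j = 's' then cifrado ++ "10010 ".toList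
          else if j = 't' then cifrado ++ "10011 ".toList
          else if j = 'u' then cifrado ++ "10100 ".toList
          else if j = 'v' then cifrado ++ "10101 ".toList
          else if j = 'w' then cifrado ++ "10110 ".toList
          else if j = 'x' then cifrado ++ "10111 ".toList
          else if j = 'y' then cifrado ++ "11000 ".toList
          else if j = 'z' then cifrado ++ "11001 ".toList
          else cifrado) cifrado) s i = [i].foldl (fun s j => s ++ pieceA j) s := by
  intro s i
  beta_reduce
  rw [List.foldl_cons, List.foldl_nil, List.foldl_cons, List.foldl_nil]
  unfold pieceA
  by_cases h0 : i = ' '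
  · rw [if_pos h0, if_pos h0]
  rw [if_neg h0, if_neg h0]
  by_cases h1 : i = 'a'
  · rw [if_pos h1, if_pos h1]
  rw [if_neg h1, if_neg h1]
  by_cases h2 : i = 'b'
  · rw [if_pos h2, if_pos h2]
  rw [if_neg h2, if_neg h2]
  by_cases h3 : i = 'c'
  · rw [if_pos h3, if_pos h3]
  rw [if_neg h3, if_neg h3]
  by_cases h4 : i = 'd'
  · rw [if_pos h4, if_pos h4]
  rw [if_neg h4, if_neg h4]
  by_cases h5 : i = 'e'
  · rw [if_pos h5, if_pos h5]
  rw [if_neg h5, if_neg h5]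
  by_cases h6 : i = 'f'
  · rw [if_pos h6, if_pos h6]
  rw [if_neg h6, if_neg h6]
  by_cases h7 : i = 'g'
  · rw [if_pos h7, if_pos h7]
  rw [if_neg h7, if_neg h7]
  by_cases h8 : i = 'h'
  · rw [if_pos h8, if_pos h8]
  rw [if_neg h8, if_neg h8]
  by_cases h9 : i = 'i'
  · rw [if_pos h9, if_pos h9]
  rw [if_neg h9, if_neg h9]
  by_cases h10 : i = 'j'
  · rw [if_pos h10, if_pos h10]
  rw [if_neg h10, if_neg h10]
  by_cases h11 : i = 'k'
  · rw [if_pos h11, if_pos h11]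
  rw [if_neg h11, if_neg h11]
  by_cases h12 : i = 'l'
  · rw [if_pos h12, if_pos h12]
  rw [if_neg h12, if_neg h12]
  by_cases h13 : i = 'm'
  · rw [if_pos h13, if_pos h13]
  rw [if_neg h13, if_neg h13]
  by_cases h14 : i = 'n'
  · rw [if_pos h14, if_pos h14]
  rw [if_neg h14, if_neg h14]
  by_cases h15 : i = 'o'
  · rw [if_pos h15, if_pos h15]
  rw [if_neg h15, if_neg h15]
  by_cases h16 : i = 'p'
  · rw [if_pos h16, if_pos h16]
  rw [if_neg h16, if_neg h16]
  by_cases h17 : i = 'q'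
  · rw [if_pos h17, if_pos h17]
  rw [if_neg h17, if_neg h17]
  by_cases h18 : i = 'r'
  · rw [if_pos h18, if_pos h18]
  rw [if_neg h18, if_neg h18]
  by_cases h19 : i = 's'
  · rw [if_pos h19, if_pos h19]
  rw [if_neg h19, if_neg h19]
  by_cases h20 : i = 't'
  · rw [if_pos h20, if_pos h20]
  rw [if_neg h20, if_neg h20]
  by_cases h21 : i = 'u'
  · rw [if_pos h21, if_pos h21]
  rw [if_neg h21, if_neg h21]
  by_cases h22 : i = 'v'
  · rw [if_pos h22, if_pos h22]
  rw [if_neg h22, if_neg h22]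
  by_cases h23 : i = 'w'
  · rw [if_pos h23, if_pos h23]
  rw [if_neg h23, if_neg h23]
  by_cases h24 : i = 'x'
  · rw [if_pos h24, if_pos h24]
  rw [if_neg h24, if_neg h24]
  by_cases h25 : i = 'y'
  · rw [if_pos h25, if_pos h25]
  rw [if_neg h25, if_neg h25]
  by_cases h26 : i = 'z'
  · rw [if_pos h26, if_pos h26]
  rw [if_neg h26, if_neg h26]
  exact (List.append_nil s).symm

theorem stepB_eq : ∀ (ps : List (List Char)) (c : Char),
    (fun (partes : List (List Char)) (c : Char) =>
        if c = ' ' then partes ++ ["* ".toList]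
        else if 'a' ≤ c ∧ c ≤ 'z' then
          partes ++ [PySem.Chars.zfill (PySem.Int.toBinChars ((c.toNat : Int) - (('a'.toNat : Int)))) 5 ++ " ".toList]
        else partes) ps c = ps ++ pieceB c := by
  intro ps c
  beta_reduce
  unfold pieceB
  by_cases h0 : c = ' '
  · rw [if_pos h0, if_pos h0]
  rw [if_neg h0, if_neg h0]
  by_cases h1 : 'a' ≤ c ∧ c ≤ 'z'
  · rw [if_pos h1, if_pos h1]
  rw [if_neg h1, if_neg h1]
  exact (List.append_nil ps).symm

theorem cifBinario_spec : Claim_equal_cifBinario := by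
  intro pfrase _
  show cifBinario pfrase = cifBinario_alt pfrase
  unfold cifBinario cifBinario_alt
  rw [foldl_fun_congr (PySem.Chars.lower pfrase.toList) _
        (fun cifrado i => [i].foldl (fun s j => s ++ pieceA j) cifrado) "".toList stepA_eq]
  rw [foldl_fun_congr (PySem.Chars.lower pfrase.toList) _
        (fun partes c => partes ++ pieceB c) [] stepB_eq]
  rw [foldA_eq, foldB_eq, join_nil_eq_flatten]
  simpa using congrArg String.mk (flatten_eq (PySem.Chars.lower pfrase.toList))
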